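-- pv_equiv track=rewrite | github.com/aiaileen/Pacman | pacman-contest/myTeam.py | bottom
-- ===== SOURCE A (Python) =====
-- def bottom(foodList):
--     # return the  food list that locate at the bottom of map
--     if foodList:
--         minimum = foodList[0][1]
--         bottomList = []
--         for i in range(len(foodList)):
--             # for each food in food list, find the ones with minimal coordinate
--             if foodList[i][1] < minimum:
--                 minimum = foodList[i][1]
--                 bottomList[:] = []
--                 bottomList.append(foodList[i])
--             elif foodList[i][1] == minimum:
--                 bottomList.append(foodList[i])
--         return bottomList
-- ===== SOURCE B (Python) =====
-- def bottom(foodList):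
--     # return the food list that locate at the bottom of map
--     if foodList:
--         minimum = min(f[1] for f in foodList)
--         return [f for f in foodList if f[1] == minimum]
-- ===== Notes on version B (the rewrite author's own statement) =====
-- stated objective: simpler
-- what changed: A's single loop that maintains a running minimum and resets/extends the result list in place is replaced by two independent passes: compute the minimum y with min(), then filter the list for that y.
-- outside the precondition, e.g. on bottom([]): A returns None, B returns None
import Mathlib
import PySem

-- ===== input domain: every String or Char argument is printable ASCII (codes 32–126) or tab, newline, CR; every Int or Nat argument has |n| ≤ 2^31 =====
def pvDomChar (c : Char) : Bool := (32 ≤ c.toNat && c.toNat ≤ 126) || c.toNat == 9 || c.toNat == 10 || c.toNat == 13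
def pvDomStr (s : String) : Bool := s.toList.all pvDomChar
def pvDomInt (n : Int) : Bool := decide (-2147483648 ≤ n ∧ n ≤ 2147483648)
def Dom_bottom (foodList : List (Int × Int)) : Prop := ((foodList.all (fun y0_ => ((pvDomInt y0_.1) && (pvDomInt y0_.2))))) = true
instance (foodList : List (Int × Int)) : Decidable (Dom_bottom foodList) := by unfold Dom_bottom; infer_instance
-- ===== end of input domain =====

-- B replaces A's running-min loop with in-place list reset by two passes (min, then filter); return-value equivalence on nonempty lists.
-- ===== PORT A =====
-- the loop over range(len(foodList)) accessing foodList[i] is the fold over the elements;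
-- state = (minimum, bottomList), branches in source order
def bottom (foodList : List (Int × Int)) : List (Int × Int) :=
  match foodList with
  | [] => []   -- Python returns None here; excluded by Pre_bottom
  | f :: _ =>
    (foodList.foldl (fun (st : Int × List (Int × Int)) x =>
      if x.2 < st.1 then (x.2, [x])
      else if x.2 == st.1 then (st.1, st.2 ++ [x])
      else st) (f.2, [])).2

-- ===== PORT B =====
def bottom_alt (foodList : List (Int × Int)) : List (Int × Int) :=
  match foodList with
  | [] => []   -- Python returns None here; excluded by Pre_bottom
  | _ =>
    match PySem.List.min? (foodList.map (fun f => f.2)) (fun y => y) with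
    | some m => foodList.filter (fun f => f.2 == m)
    | none => []

-- ===== PRECONDITION & SPEC =====
-- on [] Python A returns None, not a list value, so the empty list is excluded
def Pre_bottom (foodList : List (Int × Int)) : Prop := foodList ≠ []
instance (foodList : List (Int × Int)) : Decidable (Pre_bottom foodList) := by unfold Pre_bottom; infer_instance
def pvWitness_bottom : (List (Int × Int)) := [(1, 2), (3, 1), (4, 1)]
def Spec_bottom (foodList : List (Int × Int)) (out : List (Int × Int)) : Prop := out = bottom_alt foodList
instance (foodList : List (Int × Int)) (out : List (Int × Int)) : Decidable (Spec_bottom foodList out) := by unfold Spec_bottom; infer_instance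

-- ===== CLAIM (what is proved, stated in full; the proofs are below) =====
def Claim_equal_bottom : Prop := ∀ (foodList : List (Int × Int)), Dom_bottom foodList → Pre_bottom foodList → Spec_bottom foodList (bottom foodList)

-- ===== LEMMAS AND PROOFS =====

theorem foldl_min_le (l : List (Int × Int)) : ∀ (m : Int),
    l.foldl (fun a x => min a x.2) m ≤ m := by
  induction l with
  | nil => intro m; simp
  | cons x t ih =>
      intro m
      simp only [List.foldl_cons]
      exact le_trans (ih (min m x.2)) (min_le_left _ _)

theorem loop_char (l : List (Int × Int)) : ∀ (m : Int) (acc : List (Int × Int)),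
    l.foldl (fun (st : Int × List (Int × Int)) x =>
      if x.2 < st.1 then (x.2, [x])
      else if x.2 == st.1 then (st.1, st.2 ++ [x])
      else st) (m, acc) =
    (l.foldl (fun a x => min a x.2) m,
     (if l.foldl (fun a x => min a x.2) m < m then [] else acc)
       ++ l.filter (fun x => x.2 == l.foldl (fun a x => min a x.2) m)) := by
  induction l with
  | nil => intro m acc; simp
  | cons x t ih =>
      intro m acc
      have hle : t.foldl (fun a x => min a x.2) (min m x.2) ≤ min m x.2 :=
        foldl_min_le t (min m x.2)
      simp only [List.foldl_cons, List.filter_cons]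
      by_cases h1 : x.2 < m
      · have hm : min m x.2 = x.2 := by omega
        simp only [if_pos h1, ih, hm]
        have h2 : t.foldl (fun a x => min a x.2) x.2 < m := by
          rw [hm] at hle; omega
        rw [hm] at hle
        by_cases h3 : t.foldl (fun a x => min a x.2) x.2 < x.2
        · simp only [if_pos h3, if_pos h2]
          have : ¬ (x.2 == t.foldl (fun a x => min a x.2) x.2) = true := by
            simp; omega
          simp [this]
        · have heq : t.foldl (fun a x => min a x.2) x.2 = x.2 := by omega
          simp [heq, h1]
      · by_cases h2 : x.2 = m
        · have hm : min m x.2 = m := by omega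
          simp only [if_neg h1, if_pos (by simp [h2] : (x.2 == m) = true), ih, hm]
          rw [hm] at hle
          by_cases h3 : t.foldl (fun a x => min a x.2) m < m
          · have : ¬ (x.2 == t.foldl (fun a x => min a x.2) m) = true := by
              simp; omega
            simp [h3, this]
          · have heq : t.foldl (fun a x => min a x.2) m = m := by omega
            simp [heq, h2]
        · have hm : min m x.2 = m := by omega
          simp only [if_neg h1, if_neg (by simp [h2] : ¬ (x.2 == m) = true), ih, hm]
          rw [hm] at hle
          have : ¬ (x.2 == t.foldl (fun a x => min a x.2) m) = true := by
            simp; omega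
          simp [this]

-- ===== VERDICT (by name: the statement is the Claim_ definition above) =====
theorem bottom_spec : Claim_equal_bottom := by
  intro foodList _ hpre
  unfold Spec_bottom bottom bottom_alt
  match foodList with
  | [] => exact absurd rfl hpre
  | f :: fs =>
    simp only [List.foldl_cons, List.map_cons]
    rw [if_neg (lt_irrefl f.2), if_pos (by simp), PySem.List.min?_id_cons, List.nil_append, loop_char fs f.2 [f]]
    have hmap : (fs.map (fun f => f.2)).foldl min f.2
        = fs.foldl (fun a x => min a x.2) f.2 := by
      rw [List.foldl_map]
    have hle : fs.foldl (fun a x => min a x.2) f.2 ≤ f.2 := foldl_min_le fs f.2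
    rw [hmap]
    simp only [List.filter_cons]
    by_cases h : fs.foldl (fun a x => min a x.2) f.2 < f.2
    · have : ¬ (f.2 == fs.foldl (fun a x => min a x.2) f.2) = true := by simp; omega
      simp [h, this]
    · have heq : fs.foldl (fun a x => min a x.2) f.2 = f.2 := by omega
      simp [heq]
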